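-- pv_equiv track=rewrite | github.com/sunyeongchoi/sydsyd_challenge | argorithm/ni_test1.py | solution
-- ===== SOURCE A (Python) =====
-- def solution(A):
--     answer = ''
--
--     if A < 0:
--         A = str(abs(A))
--         A_list = list(str(abs(A)))
--
--         for i, n in enumerate(A_list):
--             if int(n) > 5:
--                 answer+='5'
--                 answer+=A[i:]
--                 return int(answer)
--             else:
--                 answer+=n
--     else:
--         A = str(A)
--         A_list = list(str(A))
--         for i, n in enumerate(A_list):
--             if int(n) < 5:
--                 answer+='5'
--                 answer+=A[i:]
--                 return int(answer)
--             else: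
--                 answer+=n
--     return int(answer)
-- ===== SOURCE B (Python) =====
-- def solution(A):
--     s = str(A)
--     return int(max(s[:i] + '5' + s[i:] for i in range(len(s) + 1)))
-- ===== Notes on version B (the rewrite author's own statement) =====
-- stated objective: alternative
-- what changed: Replaces A's greedy char-by-char scan with accumulator and early return by a generate-all-insertions-and-take-the-lexicographic-maximum strategy (all candidates have equal length, so string max equals numeric max); this also fixes A's forgotten insertion when every digit is >= 5.
-- intended difference: On nonnegative inputs whose decimal digits are all >= 5 (e.g. 5, 99, 576), A returns the input unchanged (it never inserts anything), while B returns the number with 5 appended (e.g. 55, 995, 5765), which is the intended result of inserting the digit 5; on all other inputs the two agree exactly. — e.g. on solution(5): A returns 5, B returns 55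
import Mathlib
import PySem

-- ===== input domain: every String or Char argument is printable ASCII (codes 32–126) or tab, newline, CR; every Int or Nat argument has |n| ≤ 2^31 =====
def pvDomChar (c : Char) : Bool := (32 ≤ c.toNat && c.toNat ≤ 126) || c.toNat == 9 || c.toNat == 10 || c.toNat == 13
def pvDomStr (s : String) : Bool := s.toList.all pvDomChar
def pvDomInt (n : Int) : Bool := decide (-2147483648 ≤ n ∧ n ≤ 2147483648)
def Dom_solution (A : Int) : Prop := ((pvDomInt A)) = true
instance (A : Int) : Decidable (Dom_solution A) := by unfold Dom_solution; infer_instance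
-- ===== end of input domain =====

-- B replaces A's greedy first-digit-below-5 scan by "generate every insertion of '5' and take the
-- lexicographic maximum" (all candidates have equal length, so string max is numeric max); on
-- inputs whose digits are all ≥ 5 B intentionally differs from A (see D_solution below).

-- ===== PORT A =====
-- the for-loop over enumerate(A_list) with accumulator `answer`; early return on int(n) < 5
def solGo (s : List Char) (pairs : List (Int × Char)) (answer : List Char) : Int :=
  match pairs with
  | [] => (PySem.Int.ofChars? answer).getD 0
  | (i, n) :: rest =>
    if (PySem.Int.ofChars? [n]).getD 0 < 5 then
      (PySem.Int.ofChars? (answer ++ ['5'] ++ PySem.List.slice s (some i) none)).getD 0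
    else solGo s rest (answer ++ [n])

def solution (A : Int) : Int :=
  if A < 0 then 0  -- Python: `abs(str(abs(A)))` raises TypeError for every A < 0; excluded by Pre_solution
  else
    let s := PySem.Int.toChars A
    solGo s (PySem.List.enumerate s) []

-- ===== PORT B =====
def solution_alt (A : Int) : Int :=
  let s := PySem.Int.toChars A
  let cands := (PySem.List.pyRange 0 (PySem.List.len s + 1)).map
    (fun i => PySem.List.slice s none (some i) ++ ['5'] ++ PySem.List.slice s (some i) none)
  (PySem.Int.ofChars? ((PySem.List.max? cands (fun x => x)).getD [])).getD 0

-- ===== PRECONDITION & SPEC =====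
-- Pre_ excludes exactly the negative inputs: there A raises TypeError (abs applied to a string).
def Pre_solution (A : Int) : Prop := 0 ≤ A
instance (A : Int) : Decidable (Pre_solution A) := by unfold Pre_solution; infer_instance
def pvWitness_solution : Int := 12

-- On nonnegative inputs whose decimal digits are all ≥ 5, A returns the input unchanged (it never
-- inserts anything), while B returns the input with the digit 5 appended — the intended insertion.
def D_solution (A : Int) : Prop := ((PySem.Int.toChars A).all (fun c => decide ('5' ≤ c))) = true
instance (A : Int) : Decidable (D_solution A) := by unfold D_solution; infer_instance

def Spec_solution (A : Int) (out : Int) : Prop := ¬ D_solution A → out = solution_alt A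
instance (A : Int) (out : Int) : Decidable (Spec_solution A out) := by unfold Spec_solution; infer_instance

def pvDiffWitness_solution : Int := 5
def pvDiffWitnessOut_solution : Int × Int := (5, 55)

-- ===== CLAIM (what is proved, stated in full; the proofs are below) =====
def Claim_unchanged_solution : Prop := ∀ (A : Int), Dom_solution A → Pre_solution A → Spec_solution A (solution A)
def Claim_changed_solution : Prop := Dom_solution (pvDiffWitness_solution) ∧ Pre_solution (pvDiffWitness_solution) ∧ D_solution (pvDiffWitness_solution) ∧ solution (pvDiffWitness_solution) = pvDiffWitnessOut_solution.1 ∧ solution_alt (pvDiffWitness_solution) = pvDiffWitnessOut_solution.2 ∧ pvDiffWitnessOut_solution.1 ≠ pvDiffWitnessOut_solution.2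

-- ===== LEMMAS AND PROOFS =====

-- the candidate string: '5' spliced in before position i
def insAt (s : List Char) (i : Nat) : List Char := s.take i ++ '5' :: s.drop i

theorem toDigitsCore_digit (f : Nat) : ∀ (n : Nat) (acc : List Char),
    (∀ c ∈ acc, ∃ m ∈ List.range 10, c = Nat.digitChar m) →
    ∀ c ∈ Nat.toDigitsCore 10 f n acc, ∃ m ∈ List.range 10, c = Nat.digitChar m := by
  induction f with
  | zero => intro n acc hacc; simpa [Nat.toDigitsCore] using hacc
  | succ f ih =>
    intro n acc hacc c hc
    rw [Nat.toDigitsCore] at hc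
    by_cases h : n / 10 = 0
    · simp only [h, if_true] at hc
      rcases List.mem_cons.mp hc with h1 | h2
      · exact ⟨n % 10, by simp [List.mem_range]; omega, by simp [h1]⟩
      · exact hacc c h2
    · simp only [h, if_false] at hc
      refine ih (n/10) _ ?_ c hc
      intro c' hc'
      rcases List.mem_cons.mp hc' with h1 | h2
      · exact ⟨n % 10, by simp [List.mem_range]; omega, by simp [h1]⟩
      · exact hacc c' h2

theorem toChars_digit (A : Int) (h : 0 ≤ A) :
    ∀ c ∈ PySem.Int.toChars A, ∃ m ∈ List.range 10, c = Nat.digitChar m := by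
  have : ¬ A < 0 := by omega
  simp only [PySem.Int.toChars, this, if_false, Nat.toDigits]
  exact toDigitsCore_digit _ _ _ (by simp)


theorem digit_bridge (c : Char) (hc : ∃ m ∈ List.range 10, c = Nat.digitChar m) :
    ((PySem.Int.ofChars? [c]).getD 0 < 5) ↔ c < '5' := by
  obtain ⟨m, hm, rfl⟩ := hc
  have key : ∀ m ∈ List.range 10, ((PySem.Int.ofChars? [Nat.digitChar m]).getD 0 < 5) ↔ Nat.digitChar m < '5' := by decide
  exact key m hm


theorem lex_append_cons_lt {x y : Char} (pre u v : List Char) (h : x < y) :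
    pre ++ x :: u < pre ++ y :: v := by
  induction pre with
  | nil => exact List.cons_lt_cons_iff.mpr (Or.inl h)
  | cons a pre ih => exact List.cons_lt_cons_iff.mpr (Or.inr ⟨rfl, ih⟩)

theorem lex_append_cons_not_lt {x y : Char} (pre u v : List Char) (h : x < y) :
    ¬ (pre ++ y :: v < pre ++ x :: u) := by
  induction pre with
  | nil =>
    intro hlt
    rcases List.cons_lt_cons_iff.mp hlt with h1 | ⟨h1, _⟩
    · exact absurd h (lt_asymm h1)
    · exact absurd h (by simp [h1])
  | cons a pre ih =>
    intro hlt
    rcases List.cons_lt_cons_iff.mp hlt with h1 | ⟨_, h2⟩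
    · exact lt_irrefl a h1
    · exact ih h2

-- decomposition of insAt at a position i < s.length
theorem insAt_succ (s : List Char) (i : Nat) (hi : i < s.length) :
    insAt s (i+1) = s.take i ++ s[i] :: '5' :: s.drop (i+1) := by
  unfold insAt
  rw [← List.take_concat_get (l := s) (i := i) (h := hi), List.concat_eq_append, List.append_assoc]
  rfl

theorem insAt_eq_cons (s : List Char) (i : Nat) (hi : i < s.length) :
    insAt s i = s.take i ++ '5' :: s[i] :: s.drop (i+1) := by
  unfold insAt
  rw [List.drop_eq_getElem_cons hi]

theorem foldl_max_keep (g : Option (List Char) → List Char → Option (List Char))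
    (hg3 : ∀ m x, ¬ (m < x) → g (some m) x = some m)
    (m : List Char) (xs : List (List Char)) (h : ∀ x ∈ xs, ¬ (m < x)) :
    xs.foldl g (some m) = some m := by
  induction xs generalizing m with
  | nil => rfl
  | cons a xs ih =>
    simp only [List.foldl_cons]
    rw [hg3 _ _ (h a (List.mem_cons_self))]
    exact ih _ (fun x hx => h x (List.mem_cons_of_mem _ hx))

theorem foldl_max_phase1 (g : Option (List Char) → List Char → Option (List Char))
    (hg1 : ∀ x, g none x = some x)
    (hg2 : ∀ m x, m < x → g (some m) x = some x)
    (hg3 : ∀ m x, ¬ (m < x) → g (some m) x = some m)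
    (s : List Char) (k : Nat) (hk : k < s.length)
    (h5 : ∀ i, (hi : i < k) → '5' ≤ s[i]'(lt_trans hi hk)) :
    ((List.range (k+1)).map (insAt s)).foldl g none = some (insAt s k) := by
  induction k with
  | zero => simp [hg1]
  | succ k ih =>
    have hk' : k < s.length := lt_trans (Nat.lt_succ_self k) hk
    rw [List.range_succ, List.map_append, List.foldl_append]
    rw [ih hk' (fun i hi => h5 i (lt_trans hi (Nat.lt_succ_self k)))]
    simp only [List.map_cons, List.map_nil, List.foldl_cons, List.foldl_nil]
    have h5k : '5' ≤ s[k]'hk' := h5 k (Nat.lt_succ_self k)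
    rcases lt_or_eq_of_le h5k with hlt | heq
    · rw [hg2]
      rw [insAt_eq_cons s k hk', insAt_succ s k hk']
      exact lex_append_cons_lt _ _ _ hlt
    · rw [insAt_eq_cons s k hk', insAt_succ s k hk', ← heq]
      rw [hg3 _ _ (lt_irrefl _)]

theorem insAt_later_not_gt (s : List Char) (k : Nat) (hk : k < s.length)
    (hd : s[k] < '5') : ∀ j, k < j → ¬ (insAt s k < insAt s j) := by
  intro j hj
  have hkj : k < min j s.length := lt_min hj hk
  have hklen : k < (s.take j).length := by simpa using hkj
  have hsplit : s.take j = s.take k ++ s[k] :: ((s.take j).drop (k+1)) := by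
    conv_lhs => rw [← List.take_append_drop k (s.take j)]
    rw [List.take_take, min_eq_left (le_of_lt hj)]
    rw [List.drop_eq_getElem_cons hklen]
    rw [List.getElem_take]
  have h1 : insAt s j = s.take k ++ s[k] :: (((s.take j).drop (k+1)) ++ '5' :: s.drop j) := by
    unfold insAt
    conv_lhs => rw [hsplit]
    rw [List.append_assoc, List.cons_append]
  rw [h1]
  show ¬ (insAt s k < _)
  unfold insAt
  exact lex_append_cons_not_lt _ _ _ hd

theorem alt_found (A : Int) (p : List Char) (d : Char) (t : List Char)
    (hs : PySem.Int.toChars A = p ++ d :: t)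
    (hp : ∀ c ∈ p, '5' ≤ c) (hd : d < '5') :
    solution_alt A = (PySem.Int.ofChars? (p ++ '5' :: d :: t)).getD 0 := by
  unfold solution_alt
  simp only []
  set s := PySem.Int.toChars A
  have hlen : s.length = p.length + (t.length + 1) := by rw [hs]; simp
  have harg : PySem.List.len s + 1 = ((s.length + 1 : Nat) : Int) := by
    rw [PySem.List.len_eq]; push_cast; ring
  rw [harg, PySem.List.pyRange_zero_natCast, List.map_map]
  have hmap : ((fun i => PySem.List.slice s none (some i) ++ ['5'] ++ PySem.List.slice s (some i) none) ∘ fun k : Nat => (k : Int)) = insAt s := by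
    funext k
    simp only [Function.comp, PySem.List.slice_to_natCast, PySem.List.slice_from_natCast]
    simp [insAt]
  rw [hmap]
  have hk : p.length < s.length := by omega
  have hsk : s[p.length]'hk = d := by
    simp only [hs]
    rw [List.getElem_append_right (le_refl _)]
    simp
  have hmax : PySem.List.max? ((List.range (s.length + 1)).map (insAt s)) (fun x => x)
      = some (insAt s p.length) := by
    have hsplit : s.length + 1 = (p.length + 1) + (t.length + 1) := by omega
    rw [hsplit, List.range_add, List.map_append]
    simp only [PySem.List.max?]
    beta_reduce
    rw [List.foldl_append]
    rw [foldl_max_phase1 _ (fun x => rfl) (fun m x h => if_pos h) (fun m x h => if_neg h)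
      s p.length hk (by
      intro i hi
      have : s[i]'(lt_trans hi hk) = p[i]'hi := by
        simp only [hs]; exact List.getElem_append_left hi
      rw [this]
      exact hp _ (List.getElem_mem hi))]
    rw [foldl_max_keep _ (fun m x h => if_neg h)]
    intro x hx
    simp only [List.mem_map, List.mem_range] at hx
    obtain ⟨j, hj, rfl⟩ := hx
    exact insAt_later_not_gt s p.length hk (by rw [hsk]; exact hd) _ (by omega)
  rw [hmax]
  have : insAt s p.length = p ++ '5' :: d :: t := by
    unfold insAt
    rw [hs, List.take_left, List.drop_left]
  rw [this]
  rfl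

theorem solGo_found (s : List Char) (p : List Char) (d : Char) (t : List Char) :
    ∀ answer : List Char,
    (∀ c ∈ p, ¬ ((PySem.Int.ofChars? [c]).getD 0 < 5)) →
    ((PySem.Int.ofChars? [d]).getD 0 < 5) →
    s = answer ++ p ++ d :: t →
    solGo s (PySem.List.enumerate (p ++ d :: t) answer.length) answer
      = (PySem.Int.ofChars? (answer ++ p ++ '5' :: d :: t)).getD 0 := by
  induction p with
  | nil =>
    intro answer _ hd hs
    simp only [List.nil_append]
    rw [PySem.List.enumerate.eq_2]
    simp only [solGo, if_pos hd]
    rw [PySem.List.slice_from_natCast]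
    subst hs
    simp
  | cons c p ih =>
    intro answer hp hd hs
    simp only [List.cons_append]
    rw [PySem.List.enumerate.eq_2]
    simp only [solGo, if_neg (hp c (List.mem_cons_self))]
    have harg : (answer.length : Int) + 1 = ((answer ++ [c]).length : Int) := by simp
    rw [harg]
    rw [ih (answer ++ [c]) (fun c' hc' => hp c' (List.mem_cons_of_mem _ hc')) hd
      (by simpa [List.append_assoc] using hs)]
    simp

-- ===== VERDICT (by name: the statement is the Claim_ definition above) =====
theorem solution_spec : Claim_unchanged_solution := by
  intro A _ hpre
  unfold Spec_solution
  intro hnd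
  have hpre' : (0:Int) ≤ A := hpre
  set s := PySem.Int.toChars A with hsdef
  have hdrop : s.dropWhile (fun c => decide ('5' ≤ c)) ≠ [] := by
    intro h0
    exact hnd (List.all_eq_true.mpr (List.dropWhile_eq_nil_iff.mp h0))
  obtain ⟨d, t, hdt⟩ : ∃ d t, s.dropWhile (fun c => decide ('5' ≤ c)) = d :: t := by
    cases h : s.dropWhile (fun c => decide ('5' ≤ c)) with
    | nil => exact absurd h hdrop
    | cons d t => exact ⟨d, t, rfl⟩
  set p := s.takeWhile (fun c => decide ('5' ≤ c)) with hpdef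
  have hs : s = p ++ d :: t := by rw [hpdef, ← hdt, List.takeWhile_append_dropWhile]
  have hp5 : ∀ c ∈ p, '5' ≤ c := by
    intro c hc
    rw [hpdef] at hc
    exact of_decide_eq_true (List.mem_takeWhile_imp (p := fun c => decide ('5' ≤ c)) hc)
  have hd5 : d < '5' := by
    have := List.head_dropWhile_not (fun c => decide ('5' ≤ c)) hdrop
    simp only [hdt, List.head_cons] at this
    exact not_le.mp (of_decide_eq_false this)
  have hdig := toChars_digit A hpre'
  rw [alt_found A p d t hs hp5 hd5]
  unfold solution
  rw [if_neg (not_lt.mpr hpre')]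
  simp only []
  have hstart : PySem.List.enumerate s = PySem.List.enumerate (p ++ d :: t) ((List.length ([] : List Char) : Int)) := by
    rw [← hs]; rfl
  rw [← hsdef, hstart]
  rw [solGo_found s p d t []
    (fun c hc => by
      rw [digit_bridge c (hdig c (by rw [hsdef] at hs; rw [hs]; exact List.mem_append_left _ hc))]
      exact not_lt.mpr (hp5 c hc))
    (by
      rw [digit_bridge d (hdig d (by rw [hsdef] at hs; rw [hs]; exact List.mem_append_right _ (List.mem_cons_self)))]
      exact hd5)
    (by simpa using hs)]
  rw [List.nil_append]

set_option maxRecDepth 8192 in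
theorem solution_changed : Claim_changed_solution := by
  unfold Claim_changed_solution; decide
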